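-- pv_equiv track=rewrite | github.com/NNPDF/nnpdf | nnpdf_data/nnpdf_data/commondataparser.py | _get_process_description
-- ===== SOURCE A (Python) =====
-- PROCESS_DESCRIPTION_LABEL = {
--     "EWJ_JRAP": "Jet Rapidity Distribution",
--     "EWK_RAP": "Drell-Yan Rapidity Distribution",
--     "EWJ_RAP": "Jet Rapidity Distribution",
--     "HQP_PTQ": "Heavy Quarks Production Single Quark Transverse Momentum Distribution",
--     "JET": "Jets Rapidity Distribution",
--     "HIG_RAP": "Higgs Rapidity Distribution",
--     "HQP_YQ": "Heavy Quarks Production Single Quark Rapidity Distribution",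
--     "EWJ_JPT": "Jet Transverse Momentum Distribution",
--     "DIS": "Deep Inelastic Scattering",
--     "HQP_PTQQ": "Heavy Quarks Production Transverse Momentum Distribution",
--     "EWK_PT": "Drell-Yan Transverse Momentum Distribution",
--     "EWJ_PT": "Jet Transverse Momentum Distribution",
--     "PHT": "Photon Production",
--     "HQP_MQQ": "Heavy Quarks Production Mass Distribution",
--     "EWK_PTRAP": "Drell-Yan Transverse Momentum Distribution",
--     "HQP_YQQ": "Heavy Quarks Production Rapidity Distribution",
--     "INC": "Heavy Quarks Total Cross Section",
--     "EWJ_MLL": "Jet Mass Distribution",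
--     "EWK_MLL": "Drell-Yan Mass Distribution",
--     "DIJET": "Dijets Invariant Mass and Rapidity Distribution",
--     "DYP": "Fixed-Target Drell-Yan",
--     "JET_POL": "Inclusive Jet longitudinal double-spin asymmetry",
--     "DIJET_POL": "Dijets longitudinal double-spin asymmetry",
--     "SHP_ASY": "double spin asymmetry in single hadron production",
--     "DY_MLL": "Drell-Yan Mass Distribution of Lepton Pairs",
--     "DY_W_ETA": "Drell-Yan W boson rapidity distribution",
-- }
--
-- def _get_process_description(process_type):
--     """Get the process description string for a given process type
--     Similarly to kinlabel, some special cases are taken into account.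
--     """
--     try:
--         return process_type.description
--     except AttributeError:
--         # This process needs to be updated
--         pass
--
--     if process_type in PROCESS_DESCRIPTION_LABEL:
--         return PROCESS_DESCRIPTION_LABEL[process_type]
--     # If not, is this a DYP- or DIS-like dataset?
--     if process_type[:3] in ("DIS", "DYP"):
--         return _get_process_description(process_type[:3])
--     # Remove pieces of "_" until it is found
--     if len(process_type.split("_")) > 1:
--         return _get_process_description(process_type.rsplit("_", 1)[0])
--     raise KeyError(f"Label {process_type} not found in PROCESS_DESCRIPTION_LABEL")
-- ===== SOURCE B (Python) =====
-- PROCESS_DESCRIPTION_LABEL = {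
--     "EWJ_JRAP": "Jet Rapidity Distribution",
--     "EWK_RAP": "Drell-Yan Rapidity Distribution",
--     "EWJ_RAP": "Jet Rapidity Distribution",
--     "HQP_PTQ": "Heavy Quarks Production Single Quark Transverse Momentum Distribution",
--     "JET": "Jets Rapidity Distribution",
--     "HIG_RAP": "Higgs Rapidity Distribution",
--     "HQP_YQ": "Heavy Quarks Production Single Quark Rapidity Distribution",
--     "EWJ_JPT": "Jet Transverse Momentum Distribution",
--     "DIS": "Deep Inelastic Scattering",
--     "HQP_PTQQ": "Heavy Quarks Production Transverse Momentum Distribution",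
--     "EWK_PT": "Drell-Yan Transverse Momentum Distribution",
--     "EWJ_PT": "Jet Transverse Momentum Distribution",
--     "PHT": "Photon Production",
--     "HQP_MQQ": "Heavy Quarks Production Mass Distribution",
--     "EWK_PTRAP": "Drell-Yan Transverse Momentum Distribution",
--     "HQP_YQQ": "Heavy Quarks Production Rapidity Distribution",
--     "INC": "Heavy Quarks Total Cross Section",
--     "EWJ_MLL": "Jet Mass Distribution",
--     "EWK_MLL": "Drell-Yan Mass Distribution",
--     "DIJET": "Dijets Invariant Mass and Rapidity Distribution",
--     "DYP": "Fixed-Target Drell-Yan",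
--     "JET_POL": "Inclusive Jet longitudinal double-spin asymmetry",
--     "DIJET_POL": "Dijets longitudinal double-spin asymmetry",
--     "SHP_ASY": "double spin asymmetry in single hadron production",
--     "DY_MLL": "Drell-Yan Mass Distribution of Lepton Pairs",
--     "DY_W_ETA": "Drell-Yan W boson rapidity distribution",
-- }
--
--
-- def _get_process_description(process_type):
--     """Get the process description string for a given process type."""
--     try:
--         return process_type.description
--     except AttributeError:
--         pass
--
--     if process_type in PROCESS_DESCRIPTION_LABEL:
--         return PROCESS_DESCRIPTION_LABEL[process_type]
--     # A DYP- or DIS-like dataset resolves to its three-letter prefix; trimmed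
--     # labels are never DIS/DYP-like, so this is checked once, up front.
--     if process_type[:3] in ("DIS", "DYP"):
--         return PROCESS_DESCRIPTION_LABEL[process_type[:3]]
--     # Truncate at the last "_" until the label is found.
--     label = process_type
--     while (cut := label.rfind("_")) != -1:
--         label = label[:cut]
--         if label in PROCESS_DESCRIPTION_LABEL:
--             return PROCESS_DESCRIPTION_LABEL[label]
--     raise KeyError(f"Label {label} not found in PROCESS_DESCRIPTION_LABEL")
-- ===== Notes on version B (the rewrite author's own statement) =====
-- stated objective: idiomatic
-- what changed: A's per-step recursion, which re-enters the full dispatch and re-splits the label with split/rsplit on every step, is replaced by one up-front dict and DIS/DYP-prefix check followed by an iterative rfind-and-truncate loop with a single dict probe per step.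
import Mathlib
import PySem

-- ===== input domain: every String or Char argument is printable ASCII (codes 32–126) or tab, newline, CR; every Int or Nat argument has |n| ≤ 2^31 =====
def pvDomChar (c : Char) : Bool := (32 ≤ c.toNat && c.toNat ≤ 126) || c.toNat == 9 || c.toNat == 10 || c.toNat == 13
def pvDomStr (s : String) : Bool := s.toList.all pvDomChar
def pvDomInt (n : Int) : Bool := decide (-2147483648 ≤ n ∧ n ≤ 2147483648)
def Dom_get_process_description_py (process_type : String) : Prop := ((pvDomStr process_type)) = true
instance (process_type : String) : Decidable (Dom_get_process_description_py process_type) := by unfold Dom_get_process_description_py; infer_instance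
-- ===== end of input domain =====

-- B replaces A's per-step recursion (which re-enters the full dispatch and re-splits the label)
-- by one up-front dict/DIS/DYP check plus an iterative rfind-and-truncate loop — idiomatic, not faster.

-- The module constant PROCESS_DESCRIPTION_LABEL, keys on the List Char side.
def pvPDL : PySem.Dict (List Char) String := PySem.Dict.ofList [
  ("EWJ_JRAP".toList, "Jet Rapidity Distribution"),
  ("EWK_RAP".toList, "Drell-Yan Rapidity Distribution"),
  ("EWJ_RAP".toList, "Jet Rapidity Distribution"),
  ("HQP_PTQ".toList, "Heavy Quarks Production Single Quark Transverse Momentum Distribution"),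
  ("JET".toList, "Jets Rapidity Distribution"),
  ("HIG_RAP".toList, "Higgs Rapidity Distribution"),
  ("HQP_YQ".toList, "Heavy Quarks Production Single Quark Rapidity Distribution"),
  ("EWJ_JPT".toList, "Jet Transverse Momentum Distribution"),
  ("DIS".toList, "Deep Inelastic Scattering"),
  ("HQP_PTQQ".toList, "Heavy Quarks Production Transverse Momentum Distribution"),
  ("EWK_PT".toList, "Drell-Yan Transverse Momentum Distribution"),
  ("EWJ_PT".toList, "Jet Transverse Momentum Distribution"),
  ("PHT".toList, "Photon Production"),
  ("HQP_MQQ".toList, "Heavy Quarks Production Mass Distribution"),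
  ("EWK_PTRAP".toList, "Drell-Yan Transverse Momentum Distribution"),
  ("HQP_YQQ".toList, "Heavy Quarks Production Rapidity Distribution"),
  ("INC".toList, "Heavy Quarks Total Cross Section"),
  ("EWJ_MLL".toList, "Jet Mass Distribution"),
  ("EWK_MLL".toList, "Drell-Yan Mass Distribution"),
  ("DIJET".toList, "Dijets Invariant Mass and Rapidity Distribution"),
  ("DYP".toList, "Fixed-Target Drell-Yan"),
  ("JET_POL".toList, "Inclusive Jet longitudinal double-spin asymmetry"),
  ("DIJET_POL".toList, "Dijets longitudinal double-spin asymmetry"),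
  ("SHP_ASY".toList, "double spin asymmetry in single hadron production"),
  ("DY_MLL".toList, "Drell-Yan Mass Distribution of Lepton Pairs"),
  ("DY_W_ETA".toList, "Drell-Yan W boson rapidity distribution")]

-- ── facts about the primitives, needed by the ports' termination proofs (cited in decreasing_by) ──

lemma pvSplitOnGo_length : ∀ (fuel : Nat) (l cur : List Char) (acc : List (List Char)),
    l.length < fuel →
    (PySem.Chars.splitOn.go ['_'] fuel l cur acc).length = acc.length + 1 + l.count '_' := by
  intro fuel
  induction fuel with
  | zero => intro l cur acc h; omega
  | succ f ih =>
    intro l cur acc h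
    cases l with
    | nil => simp [PySem.Chars.splitOn.go]
    | cons c rest =>
      rw [PySem.Chars.splitOn.go]
      by_cases hc : c = '_'
      · subst hc
        have hp : List.isPrefixOf ['_'] ('_' :: rest) = true := by simp [List.isPrefixOf]
        simp only [hp, if_true, List.length_cons, List.drop_succ_cons, List.length_nil,
          List.drop_zero, List.count_cons_self]
        rw [ih rest [] _ (by simpa using Nat.lt_of_succ_lt_succ h)]
        simp; omega
      · have hp : List.isPrefixOf ['_'] (c :: rest) = false := by
          simp [List.isPrefixOf]; exact fun hlc => absurd hlc.symm hc
        simp only [hp, Bool.false_eq_true, if_false]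
        rw [ih rest (c :: cur) acc (by simpa using Nat.lt_of_succ_lt_succ h)]
        rw [List.count_cons_of_ne (by simpa using hc)]

-- len(s.split("_")) > 1 is exactly "'_' occurs in s"
lemma pvSplitOn_length_gt_one_iff (cs : List Char) :
    1 < (PySem.Chars.splitOn cs ['_']).length ↔ '_' ∈ cs := by
  rw [PySem.Chars.splitOn, pvSplitOnGo_length _ _ _ _ (by omega)]
  simp [List.count_pos_iff]

lemma pvIsPrefixOf_underscore (cs : List Char) (i : Nat) :
    List.isPrefixOf ['_'] (cs.drop i) = true ↔ cs[i]? = some '_' := by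
  have hh : (cs.drop i).head? = cs[i]? := List.head?_drop
  cases h : cs.drop i with
  | nil =>
    rw [h] at hh
    simp [← hh]
  | cons c rest =>
    rw [h] at hh
    rw [← hh]
    simp only [List.isPrefixOf, Bool.and_eq_true, beq_iff_eq, List.head?_cons, Option.some_inj]
    constructor
    · rintro ⟨h1, _⟩; exact h1.symm
    · intro h1; exact ⟨h1.symm, by simp⟩

lemma pvRfindGo_neg (cs : List Char) : ∀ j : Nat, (∀ i : Nat, i ≤ j → cs[i]? ≠ some '_') →
    PySem.Chars.rfind.go cs ['_'] j = -1 := by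
  intro j
  induction j with
  | zero =>
    intro h
    rw [PySem.Chars.rfind.go]
    have : List.isPrefixOf ['_'] cs = false := by
      rw [← Bool.not_eq_true]
      intro hc
      rw [show cs = cs.drop 0 from (List.drop_zero).symm] at hc
      exact h 0 le_rfl ((pvIsPrefixOf_underscore cs 0).1 hc)
    simp [this]
  | succ k ih =>
    intro h
    rw [PySem.Chars.rfind.go]
    have hp : List.isPrefixOf ['_'] (cs.drop (k+1)) = false := by
      rw [← Bool.not_eq_true]
      intro hc
      exact h (k+1) le_rfl ((pvIsPrefixOf_underscore cs (k+1)).1 hc)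
    simp only [hp, Bool.false_eq_true, if_false]
    exact ih (fun i hi => h i (Nat.le_succ_of_le hi))

lemma pvRfindGo_pos (cs : List Char) : ∀ (j k : Nat), k ≤ j → cs[k]? = some '_' →
    (∀ i : Nat, k < i → i ≤ j → cs[i]? ≠ some '_') →
    PySem.Chars.rfind.go cs ['_'] j = (k : Int) := by
  intro j
  induction j with
  | zero =>
    intro k hk hget _
    interval_cases k
    rw [PySem.Chars.rfind.go]
    have : List.isPrefixOf ['_'] cs = true := by
      have := (pvIsPrefixOf_underscore cs 0).2 hget
      simpa using this
    simp [this]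
  | succ j ih =>
    intro k hk hget hmax
    rw [PySem.Chars.rfind.go]
    by_cases hkj : k = j + 1
    · subst hkj
      have : List.isPrefixOf ['_'] (cs.drop (j+1)) = true :=
        (pvIsPrefixOf_underscore cs (j+1)).2 hget
      simp [this]
    · have hk' : k ≤ j := by omega
      have hp : List.isPrefixOf ['_'] (cs.drop (j+1)) = false := by
        rw [← Bool.not_eq_true]
        intro hc
        exact hmax (j+1) (by omega) le_rfl ((pvIsPrefixOf_underscore cs (j+1)).1 hc)
      simp only [hp, Bool.false_eq_true, if_false]
      exact ih k hk' hget (fun i h1 h2 => hmax i h1 (Nat.le_succ_of_le h2))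

lemma pvExists_last_underscore (cs : List Char) (h : '_' ∈ cs) :
    ∃ k : Nat, k < cs.length ∧ cs[k]? = some '_' ∧ ∀ i : Nat, k < i → cs[i]? ≠ some '_' := by
  induction cs with
  | nil => simp at h
  | cons c rest ih =>
    by_cases hr : '_' ∈ rest
    · obtain ⟨k, hk1, hk2, hk3⟩ := ih hr
      exact ⟨k+1, by simpa using hk1, by simpa using hk2,
        fun i hi => by cases i with
          | zero => omega
          | succ i' => simpa using hk3 i' (by omega)⟩
    · have hc : c = '_' := by
        rcases List.mem_cons.1 h with h1 | h1
        · exact h1.symm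
        · exact absurd h1 hr
      refine ⟨0, by simp, by simp [hc], fun i hi => ?_⟩
      cases i with
      | zero => omega
      | succ i' =>
        simp only [List.getElem?_cons_succ]
        intro hcontra
        exact hr (List.mem_of_getElem? hcontra)

-- s.rfind("_") == -1 is exactly "'_' does not occur in s"
lemma pvRfind_eq_neg_one_iff (cs : List Char) :
    PySem.Chars.rfind cs ['_'] = -1 ↔ '_' ∉ cs := by
  constructor
  · intro h hm
    obtain ⟨k, hk1, hk2, hk3⟩ := pvExists_last_underscore cs hm
    rw [PySem.Chars.rfind, pvRfindGo_pos cs cs.length k (by omega) hk2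
      (fun i h1 _ => hk3 i h1)] at h
    omega
  · intro h
    rw [PySem.Chars.rfind]
    exact pvRfindGo_neg cs cs.length (fun i _ hc => h (List.mem_of_getElem? hc))

-- when '_' occurs, s.rfind("_") is the index of its last occurrence
lemma pvRfind_spec_of_mem (cs : List Char) (h : '_' ∈ cs) :
    ∃ k : Nat, PySem.Chars.rfind cs ['_'] = (k : Int) ∧ k < cs.length ∧ cs[k]? = some '_' ∧
      ∀ i : Nat, k < i → cs[i]? ≠ some '_' := by
  obtain ⟨k, hk1, hk2, hk3⟩ := pvExists_last_underscore cs h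
  refine ⟨k, ?_, hk1, hk2, hk3⟩
  rw [PySem.Chars.rfind]
  exact pvRfindGo_pos cs cs.length k (by omega) hk2 (fun i h1 _ => hk3 i h1)

-- ===== PORT A =====

-- hand port of `s.rsplit("_", 1)[0]` (PySem has no rsplit): everything before the last '_',
-- located with rfind; the whole string when '_' does not occur.  Exact on all inputs.
def pvRsplit1Head (cs : List Char) : List Char :=
  let cut := PySem.Chars.rfind cs ['_']
  if cut = -1 then cs else PySem.List.slice cs none (some cut)

lemma pvRsplit1Head_eq (cs : List Char) (h : '_' ∈ cs) :
    ∃ k : Nat, k < cs.length ∧ pvRsplit1Head cs = cs.take k := by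
  obtain ⟨k, hrf, hlt, _, _⟩ := pvRfind_spec_of_mem cs h
  refine ⟨k, hlt, ?_⟩
  rw [pvRsplit1Head]
  simp only [hrf]
  rw [if_neg (by omega)]
  exact PySem.List.slice_to_natCast cs k

-- the recursion of A, on the code-point list
def pvAGo (cs : List Char) : String :=
  if h1 : pvPDL.contains cs then pvPDL.getD cs ""
  else if h2 : PySem.List.slice cs none (some 3) = "DIS".toList ∨
               PySem.List.slice cs none (some 3) = "DYP".toList then
    pvAGo (PySem.List.slice cs none (some 3))
  else if h3 : 1 < (PySem.Chars.splitOn cs ['_']).length then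
    pvAGo (pvRsplit1Head cs)
  else ""  -- raise KeyError: excluded by Pre_
termination_by cs.length
decreasing_by
  · have hs3 : PySem.List.slice cs none (some 3) = cs.take 3 := by simp [pysem]
    rw [hs3] at h2 ⊢
    rcases h2 with h | h
    all_goals {
      have hlen3 : (cs.take 3).length = 3 := by rw [h]; rfl
      rw [List.length_take] at hlen3
      rcases Nat.lt_or_ge 3 cs.length with hl | hl
      · simpa [List.length_take] using by omega
      · exfalso
        rw [List.take_of_length_le hl] at h
        rw [h] at h1
        exact h1 (by decide) }
  · have hm : '_' ∈ cs := (pvSplitOn_length_gt_one_iff cs).1 h3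
    obtain ⟨k, hlt, heq⟩ := pvRsplit1Head_eq cs hm
    rw [heq]
    simp [List.length_take]; omega

def get_process_description_py (process_type : String) : String :=
  -- `process_type.description` raises AttributeError on a str, so the try/except always passes
  pvAGo process_type.toList

-- ===== PORT B =====

-- the while loop of B: trim at the last '_' (rfind), probe the dict, repeat
def pvBGo (cs : List Char) : String :=
  if hc : PySem.Chars.rfind cs ['_'] = -1 then
    ""  -- raise KeyError: excluded by Pre_
  else
    let label := PySem.List.slice cs none (some (PySem.Chars.rfind cs ['_']))
    if pvPDL.contains label then pvPDL.getD label "" else pvBGo label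
termination_by cs.length
decreasing_by
  have hm : '_' ∈ cs := by
    by_contra hnm
    exact hc ((pvRfind_eq_neg_one_iff cs).2 hnm)
  obtain ⟨k, hrf, hlt, _, _⟩ := pvRfind_spec_of_mem cs hm
  simp only [hrf, PySem.List.slice_to_natCast]
  simp [List.length_take]; omega

def get_process_description_py_alt (process_type : String) : String :=
  let cs := process_type.toList
  if pvPDL.contains cs then pvPDL.getD cs ""
  else if PySem.List.slice cs none (some 3) = "DIS".toList ∨
          PySem.List.slice cs none (some 3) = "DYP".toList then
    pvPDL.getD (PySem.List.slice cs none (some 3)) ""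
  else pvBGo cs

-- ===== PRECONDITION & SPEC =====
-- Pre_ excludes exactly the labels on which A raises KeyError: those that are not DIS/DYP-like
-- and none of whose underscore-boundary prefixes (including the full label) is a key of the table.
def Pre_get_process_description_py (process_type : String) : Prop :=
  process_type.toList.take 3 = "DIS".toList ∨ process_type.toList.take 3 = "DYP".toList ∨
  ((List.range (process_type.toList.length + 1)).any (fun n =>
    (decide (n = process_type.toList.length) || decide (process_type.toList[n]? = some '_')) &&
    pvPDL.contains (process_type.toList.take n))) = true
instance (process_type : String) : Decidable (Pre_get_process_description_py process_type) := by
  unfold Pre_get_process_description_py; infer_instance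

def pvWitness_get_process_description_py : String := "HQP_PTQ_SOMETHING"

def Spec_get_process_description_py (process_type : String) (out : String) : Prop :=
  out = get_process_description_py_alt process_type
instance (process_type : String) (out : String) :
    Decidable (Spec_get_process_description_py process_type out) := by
  unfold Spec_get_process_description_py; infer_instance

-- ===== CLAIM (what is proved, stated in full; the proofs are below) =====
def Claim_equal_get_process_description_py : Prop := ∀ (process_type : String), Dom_get_process_description_py process_type → Pre_get_process_description_py process_type → Spec_get_process_description_py process_type (get_process_description_py process_type)

-- ===== LEMMAS AND PROOFS =====

-- B's top-level dispatch, on the code-point list (proof-side restatement of the alt body)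
def pvBDispatch (cs : List Char) : String :=
  if pvPDL.contains cs then pvPDL.getD cs ""
  else if PySem.List.slice cs none (some 3) = "DIS".toList ∨
          PySem.List.slice cs none (some 3) = "DYP".toList then
    pvPDL.getD (PySem.List.slice cs none (some 3)) ""
  else pvBGo cs

lemma pvAlt_eq (s : String) : get_process_description_py_alt s = pvBDispatch s.toList := rfl

-- a trimmed label is a prefix of cs, so it can never become DIS/DYP-like when cs is not
lemma pvTake3_take (cs : List Char) (k : Nat)
    (h2 : ¬(cs.take 3 = "DIS".toList ∨ cs.take 3 = "DYP".toList)) :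
    ¬((cs.take k).take 3 = "DIS".toList ∨ (cs.take k).take 3 = "DYP".toList) := by
  rw [List.take_take]
  rintro (h | h)
  all_goals {
    have hlen : (cs.take (min 3 k)).length = 3 := by rw [h]; rfl
    rw [List.length_take] at hlen
    have hmin : min 3 k = 3 := by omega
    rw [hmin] at h
    exact h2 (by tauto) }

set_option maxHeartbeats 1600000 in
lemma pvMain : ∀ (n : Nat) (cs : List Char), cs.length < n → pvAGo cs = pvBDispatch cs := by
  intro n
  induction n with
  | zero => intro cs h; omega
  | succ m ih =>
    intro cs hlen
    rw [pvAGo, pvBDispatch]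
    by_cases h1 : pvPDL.contains cs = true
    · rw [dif_pos h1, if_pos h1]
    · rw [dif_neg h1, if_neg h1]
      by_cases h2 : PySem.List.slice cs none (some 3) = "DIS".toList ∨
                    PySem.List.slice cs none (some 3) = "DYP".toList
      · rw [dif_pos h2, if_pos h2]
        rcases h2 with h | h
        all_goals {
          rw [h, pvAGo]
          rw [dif_pos (by decide)] }
      · rw [dif_neg h2, if_neg h2]
        by_cases h3 : 1 < (PySem.Chars.splitOn cs ['_']).length
        · rw [dif_pos h3]
          have hm : '_' ∈ cs := (pvSplitOn_length_gt_one_iff cs).1 h3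
          obtain ⟨k, hrf, hltk, hget, hmax⟩ := pvRfind_spec_of_mem cs hm
          have htrim : pvRsplit1Head cs = cs.take k := by
            rw [pvRsplit1Head]
            simp only [hrf]
            rw [if_neg (by omega)]
            exact PySem.List.slice_to_natCast cs k
          rw [htrim]
          have hlen' : (cs.take k).length < m := by
            simp [List.length_take]; omega
          rw [ih (cs.take k) hlen']
          -- now evaluate B's loop one step on cs
          rw [pvBGo]
          rw [dif_neg (by rw [hrf]; omega)]
          simp only [hrf, PySem.List.slice_to_natCast]
          -- pvBDispatch (cs.take k) has a dead DIS/DYP branch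
          rw [pvBDispatch]
          have hs3 : PySem.List.slice (cs.take k) none (some 3) = (cs.take k).take 3 := by
            simp [pysem]
          have h2' : ¬(cs.take 3 = "DIS".toList ∨ cs.take 3 = "DYP".toList) := by
            intro hbad
            exact h2 (by simpa [pysem] using hbad)
          have hdead := pvTake3_take cs k h2'
          by_cases hct : pvPDL.contains (cs.take k) = true
          · rw [if_pos hct, if_pos hct]
          · rw [if_neg hct, if_neg hct, if_neg (by rw [hs3]; exact hdead)]
        · rw [dif_neg h3]
          have hnm : '_' ∉ cs := fun hm => h3 ((pvSplitOn_length_gt_one_iff cs).2 hm)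
          rw [pvBGo, dif_pos ((pvRfind_eq_neg_one_iff cs).2 hnm)]

-- ===== VERDICT (by name: the statement is the Claim_ definition above) =====
theorem get_process_description_py_spec : Claim_equal_get_process_description_py := by
  intro s _ _
  unfold Spec_get_process_description_py
  rw [pvAlt_eq]
  exact pvMain (s.toList.length + 1) s.toList (by omega)
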